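-- pv_equiv track=rewrite | github.com/danielzhang2001/Clodbot | sheets/sheet.py | create_pokemon_message
-- ===== SOURCE A (Python) =====
-- from typing import Optional, List, Dict, Tuple
--
-- def create_pokemon_message(values: List[List[str]]) -> str:
--     # Creates the message when asked to list Pokemon in the sheet.
--     pokemon = sorted(
--         get_sheet_pokemon(values),
--         key=lambda x: (
--             (x[2] == "N/A", -int(x[2]) if x[2] not in ("", "N/A") else 0),
--             (x[3] == "N/A", int(x[3]) if x[3] not in ("", "N/A") else 0),
--         ),
--     )
--     message = "**POKEMON:**\n```"
--     message += "\n".join(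
--         [
--             f"{i+1}) {player}'s {name} (Kills: {kills}, Deaths: {deaths})"
--             for i, (player, name, kills, deaths) in enumerate(pokemon)
--         ]
--     )
--     message += "\n```"
--     return message
--
-- def get_sheet_pokemon(values: List[List[str]]) -> List[List[str]]:
--     # Returns a list of all the Pokemon names with their player and their total kills/deaths.
--     pokemon = []
--     for i in range(3, len(values), 15):
--         for j in range(i, min(i + 12, len(values))):
--             row = values[j]
--             for idx, value in enumerate(row):
--                 if value.strip() and not (
--                     value.strip().replace(".", "", 1).isdigit()
--                     and value.strip().count(".") <= 1
--                 ):
--                     player = None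
--                     for k in range(j - 1, 0, -1):
--                         if idx < len(values[k]) and "POKEMON" in values[k][idx]:
--                             player = values[k - 1][idx].strip() if k > 0 else None
--                             break
--                         else:
--                             continue
--                     if player:
--                         kills = (
--                             row[idx + 2].strip()
--                             if idx + 2 < len(row) and row[idx + 2].strip().isdigit()
--                             else "N/A"
--                         )
--                         deaths = (
--                             row[idx + 3].strip()
--                             if idx + 3 < len(row) and row[idx + 3].strip().isdigit()
--                             else "N/A"
--                         )
--                         pokemon.append([player, value.strip(), kills, deaths])
--     return pokemon
-- ===== SOURCE B (Python) =====
-- from typing import List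
--
--
-- def create_pokemon_message(values: List[List[str]]) -> str:
--     # Single top-down pass: a dict maps each column to the row index of the most
--     # recent "POKEMON" header seen above, so each cell resolves its player in O(1).
--     pokemon = []
--     headers = {}  # column index -> row index of the nearest "POKEMON" header above
--     for j, row in enumerate(values):
--         if j >= 3 and (j - 3) % 15 < 12:
--             for idx, value in enumerate(row):
--                 name = value.strip()
--                 if name and not (
--                     name.replace(".", "", 1).isdigit() and name.count(".") <= 1
--                 ):
--                     k = headers.get(idx)
--                     if k is None:
--                         continue
--                     player = values[k - 1][idx].strip()
--                     if player:
--                         kills = (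
--                             row[idx + 2].strip()
--                             if idx + 2 < len(row) and row[idx + 2].strip().isdigit()
--                             else "N/A"
--                         )
--                         deaths = (
--                             row[idx + 3].strip()
--                             if idx + 3 < len(row) and row[idx + 3].strip().isdigit()
--                             else "N/A"
--                         )
--                         pokemon.append((player, name, kills, deaths))
--         if j >= 1:
--             for idx, cell in enumerate(row):
--                 if "POKEMON" in cell:
--                     headers[idx] = j
--     pokemon.sort(
--         key=lambda x: (
--             (x[2] == "N/A", -int(x[2]) if x[2] not in ("", "N/A") else 0),
--             (x[3] == "N/A", int(x[3]) if x[3] not in ("", "N/A") else 0),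
--         )
--     )
--     lines = [
--         f"{i+1}) {player}'s {name} (Kills: {kills}, Deaths: {deaths})"
--         for i, (player, name, kills, deaths) in enumerate(pokemon)
--     ]
--     return "**POKEMON:**\n```" + "\n".join(lines) + "\n```"
-- ===== Notes on version B (the rewrite author's own statement) =====
-- stated objective: faster
-- what changed: A rescans the column upward from every kept cell to find the nearest 'POKEMON' header; B makes one top-down pass keeping a per-column dict of the most recent header row, so each cell resolves its player in O(1).
import Mathlib
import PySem

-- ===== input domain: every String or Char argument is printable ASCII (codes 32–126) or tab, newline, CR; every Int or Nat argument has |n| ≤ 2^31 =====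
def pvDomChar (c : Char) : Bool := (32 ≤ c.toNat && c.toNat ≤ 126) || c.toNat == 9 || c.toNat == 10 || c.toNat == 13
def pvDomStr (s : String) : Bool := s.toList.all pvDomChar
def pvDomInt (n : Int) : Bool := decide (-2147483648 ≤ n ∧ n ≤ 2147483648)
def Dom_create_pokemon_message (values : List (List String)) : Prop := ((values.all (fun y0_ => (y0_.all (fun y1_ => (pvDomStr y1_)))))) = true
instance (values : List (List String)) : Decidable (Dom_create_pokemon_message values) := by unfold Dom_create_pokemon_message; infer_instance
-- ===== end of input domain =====

-- B replaces A's per-cell backward column scan for the nearest "POKEMON" header by a single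
-- top-down pass that keeps, per column, the row of the most recent header (objective: faster).

-- ===== shared tiny helpers (identical subexpressions of both Pythons) =====

-- s.replace(".", "", 1) for the one-character pattern ".": drop the first '.' (exact hand port)
def pvDropFirstDot : List Char → List Char
  | [] => []
  | c :: cs => if c = '.' then cs else c :: pvDropFirstDot cs

-- v.replace(".", "", 1).isdigit() and v.count(".") <= 1   (v already stripped)
def pvIsNum (v : String) : Bool :=
  PySem.Chars.strIsdigit (pvDropFirstDot v.toList) && PySem.Str.count v "." ≤ 1

-- value.strip() and not (... isdigit ... and count ...)
def pvKeep (value : String) : Bool :=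
  let v := PySem.Str.strip value
  v ≠ "" && !(pvIsNum v)

-- row[i].strip() if i < len(row) and row[i].strip().isdigit() else "N/A"
def pvKD (row : List String) (i : Int) : String :=
  if i < PySem.List.len row && PySem.Str.strIsdigit (PySem.Str.strip (PySem.List.pyGetD row i "")) then
    PySem.Str.strip (PySem.List.pyGetD row i "")
  else "N/A"

-- the sort key: ((x[2]=="N/A", -int(x[2]) or 0), (x[3]=="N/A", int(x[3]) or 0)), tuples lexicographic
def pvSortKey (x : String × String × String × String) : Lex (Lex (Bool × Int) × Lex (Bool × Int)) :=
  toLex (toLex (x.2.2.1 == "N/A",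
                if x.2.2.1 ≠ "" ∧ x.2.2.1 ≠ "N/A" then -((PySem.Int.ofStr? x.2.2.1).getD 0) else 0),
         toLex (x.2.2.2 == "N/A",
                if x.2.2.2 ≠ "" ∧ x.2.2.2 ≠ "N/A" then (PySem.Int.ofStr? x.2.2.2).getD 0 else 0))

-- f"{i+1}) {player}'s {name} (Kills: {kills}, Deaths: {deaths})"
def pvLine (i : Int) (e : String × String × String × String) : String :=
  PySem.Int.toStr (i + 1) ++ ") " ++ e.1 ++ "'s " ++ e.2.1 ++
    " (Kills: " ++ e.2.2.1 ++ ", Deaths: " ++ e.2.2.2 ++ ")"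

-- ===== PORT A =====

-- 'idx < len(values[k]) and "POKEMON" in values[k][idx]'
def pvCond (values : List (List String)) (idx : Int) (k : Nat) : Bool :=
  idx < PySem.List.len (PySem.List.pyGetD values (k : Int) []) &&
  PySem.Str.isIn "POKEMON" (PySem.List.pyGetD (PySem.List.pyGetD values (k : Int) []) idx "")

-- 'for k in range(j - 1, 0, -1): ... break' — countdown scan, called with j - 1
def pvScanA (values : List (List String)) (idx : Int) : Nat → Option String
  | 0 => none
  | k + 1 =>
    if pvCond values idx (k + 1) then
      some (PySem.Str.strip (PySem.List.pyGetD (PySem.List.pyGetD values (k : Int) []) idx ""))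
    else pvScanA values idx k

def pvGetSheetPokemon (values : List (List String)) : List (String × String × String × String) :=
  (PySem.List.pyRange 3 (PySem.List.len values) 15).foldl (fun acc i =>
    (PySem.List.pyRange i (min (i + 12) (PySem.List.len values)) 1).foldl (fun acc j =>
      let row := PySem.List.pyGetD values j []
      (PySem.List.enumerate row).foldl (fun acc p =>
        if pvKeep p.2 then
          match pvScanA values p.1 (j - 1).toNat with
          | some player =>
            if player ≠ "" then
              acc ++ [(player, PySem.Str.strip p.2, pvKD row (p.1 + 2), pvKD row (p.1 + 3))]
            else acc
          | none => acc
        else acc) acc) acc) []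

def create_pokemon_message (values : List (List String)) : String :=
  let pokemon := PySem.List.sorted (pvGetSheetPokemon values) pvSortKey
  "**POKEMON:**\n```" ++
    PySem.Str.join "\n" ((PySem.List.enumerate pokemon).map (fun p => pvLine p.1 p.2)) ++
    "\n```"

-- ===== PORT B =====

-- 'for idx, cell in enumerate(row): if "POKEMON" in cell: headers[idx] = j'
def pvHdrUpdate (j : Int) (row : List String) (d : PySem.Dict Int Int) : PySem.Dict Int Int :=
  (PySem.List.enumerate row).foldl
    (fun d p => if PySem.Str.isIn "POKEMON" p.2 then d.insert p.1 j else d) d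

-- the data-row body of B's pass: resolve each kept cell's player through the headers dict
def pvRowB (values : List (List String)) (hdrs : PySem.Dict Int Int) (row : List String)
    (acc : List (String × String × String × String)) : List (String × String × String × String) :=
  (PySem.List.enumerate row).foldl (fun acc p =>
    let name := PySem.Str.strip p.2
    if name ≠ "" && !(pvIsNum name) then
      match hdrs.get? p.1 with
      | none => acc
      | some k =>
        let player := PySem.Str.strip (PySem.List.pyGetD (PySem.List.pyGetD values (k - 1) []) p.1 "")
        if player ≠ "" then acc ++ [(player, name, pvKD row (p.1 + 2), pvKD row (p.1 + 3))] else acc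
    else acc) acc

-- 'for j, row in enumerate(values)': data rows use the dict, then every row j >= 1 refreshes it
def pvExtractPass (values : List (List String)) : List (String × String × String × String) :=
  ((PySem.List.enumerate values).foldl
    (fun (st : List (String × String × String × String) × PySem.Dict Int Int) p =>
      let acc := if 3 ≤ p.1 && PySem.Int.mod (p.1 - 3) 15 < 12 then pvRowB values st.2 p.2 st.1 else st.1
      let d := if 1 ≤ p.1 then pvHdrUpdate p.1 p.2 st.2 else st.2
      (acc, d))
    ([], PySem.Dict.empty)).1

def create_pokemon_message_alt (values : List (List String)) : String :=
  let pokemon := PySem.List.sorted (pvExtractPass values) pvSortKey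
  let lines := (PySem.List.enumerate pokemon).map (fun p => pvLine p.1 p.2)
  "**POKEMON:**\n```" ++ PySem.Str.join "\n" lines ++ "\n```"

-- ===== PRECONDITION & SPEC =====

-- column idx of row k holds a "POKEMON" header cell (stated on the input only)
def pvPHdr (values : List (List String)) (k idx : Nat) : Bool :=
  decide (idx < (values.getD k []).length) &&
  PySem.Str.isIn "POKEMON" ((values.getD k []).getD idx "")

def pvIsData (j : Nat) : Bool := decide (3 ≤ j) && decide ((j - 3) % 15 < 12)

-- a cell whose stripped text is non-blank and not a plain number (digits with at most one '.'):
-- exactly the cells A treats as Pokemon names, stated by counts/membership on the characters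
def pvPKept (value : String) : Bool :=
  let v := (PySem.Str.strip value).toList
  !v.isEmpty &&
  !(decide (v.count '.' ≤ 1) && v.all (fun c => PySem.Chars.isdigit c || c == '.') &&
    decide (v.count '.' < v.length))

-- Pre_ excludes exactly the inputs on which A raises IndexError: a kept (non-blank,
-- non-numeric) cell in a data row whose nearest "POKEMON" header row above sits over a
-- player row too short for that column. (B raises there identically.)
def Pre_create_pokemon_message (values : List (List String)) : Prop :=
  ((List.range values.length).all fun j =>
    !pvIsData j ||
    ((List.range (values.getD j []).length).all fun idx =>
      !pvPKept ((values.getD j []).getD idx "") ||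
      ((List.range j).all fun k =>
        !(decide (1 ≤ k) && pvPHdr values k idx &&
          ((List.range j).all fun k' => !(decide (k < k') && pvPHdr values k' idx))) ||
        decide (idx < (values.getD (k - 1) []).length)))) = true

instance (values : List (List String)) : Decidable (Pre_create_pokemon_message values) := by
  unfold Pre_create_pokemon_message; infer_instance

def pvWitness_create_pokemon_message : List (List String) :=
  [[], ["Alice"], ["POKEMON"], ["Pika", "", "3", "4"]]

def Spec_create_pokemon_message (values : List (List String)) (out : String) : Prop := out = create_pokemon_message_alt values
instance (values : List (List String)) (out : String) : Decidable (Spec_create_pokemon_message values out) := by unfold Spec_create_pokemon_message; infer_instance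

-- ===== CLAIM (what is proved, stated in full; the proofs are below) =====
def Claim_equal_create_pokemon_message : Prop := ∀ (values : List (List String)), Dom_create_pokemon_message values → Pre_create_pokemon_message values → Spec_create_pokemon_message values (create_pokemon_message values)

-- ===== LEMMAS AND PROOFS =====

-- the row index of the nearest header: the common characterisation both ports are reduced to
def pvScanK (values : List (List String)) (idx : Int) : Nat → Option Nat
  | 0 => none
  | k + 1 => if pvCond values idx (k + 1) then some (k + 1) else pvScanK values idx k

-- the entry (if any) contributed by cell p of data row j, phrased through pvScanK
def pvCellSpec (values : List (List String)) (j : Nat) (p : Int × String) :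
    List (String × String × String × String) :=
  if pvKeep p.2 then
    match pvScanK values p.1 (j - 1) with
    | some k =>
      let player := PySem.Str.strip (PySem.List.pyGetD (PySem.List.pyGetD values ((k : Int) - 1) []) p.1 "")
      if player ≠ "" then
        [(player, PySem.Str.strip p.2, pvKD (values.getD j []) (p.1 + 2), pvKD (values.getD j []) (p.1 + 3))]
      else []
    | none => []
  else []

-- the entries contributed by data row j
def pvRowSpec (values : List (List String)) (j : Nat) : List (String × String × String × String) :=
  (PySem.List.enumerate (values.getD j [])).flatMap (pvCellSpec values j)

theorem pvScanA_eq (values : List (List String)) (idx : Int) (m : Nat) :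
    pvScanA values idx m = (pvScanK values idx m).map
      (fun k => PySem.Str.strip (PySem.List.pyGetD (PySem.List.pyGetD values ((k : Int) - 1) []) idx "")) := by
  induction m with
  | zero => rfl
  | succ k ih =>
    simp only [pvScanA, pvScanK, ih]
    split
    · simp
    · rfl

set_option maxHeartbeats 1000000 in
theorem pvRowA_eq (values : List (List String)) (j : Int) (hj : 3 ≤ j)
    (acc : List (String × String × String × String)) :
    (PySem.List.enumerate (PySem.List.pyGetD values j [])).foldl (fun acc p =>
        if pvKeep p.2 then
          match pvScanA values p.1 (j - 1).toNat with
          | some player =>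
            if player ≠ "" then
              acc ++ [(player, PySem.Str.strip p.2, pvKD (PySem.List.pyGetD values j []) (p.1 + 2),
                       pvKD (PySem.List.pyGetD values j []) (p.1 + 3))]
            else acc
          | none => acc
        else acc) acc
      = acc ++ pvRowSpec values j.toNat := by
  have hjc : j = ((j.toNat : Nat) : Int) := by omega
  have h1 : (j - 1).toNat = j.toNat - 1 := by omega
  have hrow : PySem.List.pyGetD values j [] = values.getD j.toNat [] := by
    conv_lhs => rw [hjc]
    rw [PySem.List.pyGetD_natCast]
  have hstep : ∀ (acc : List (String × String × String × String)) (p : Int × String),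
      p ∈ PySem.List.enumerate (PySem.List.pyGetD values j []) →
      (if pvKeep p.2 then
          match pvScanA values p.1 (j - 1).toNat with
          | some player =>
            if player ≠ "" then
              acc ++ [(player, PySem.Str.strip p.2, pvKD (PySem.List.pyGetD values j []) (p.1 + 2),
                       pvKD (PySem.List.pyGetD values j []) (p.1 + 3))]
            else acc
          | none => acc
        else acc)
      = acc ++ pvCellSpec values j.toNat p := by
    intro acc p _
    rw [pvScanA_eq, h1, hrow]
    unfold pvCellSpec
    by_cases hk : pvKeep p.2 = true
    · rw [if_pos hk, if_pos hk]
      cases hs : pvScanK values p.1 (j.toNat - 1) with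
      | none => simp
      | some k =>
        by_cases hp : PySem.Str.strip (PySem.List.pyGetD (PySem.List.pyGetD values ((k : Int) - 1) []) p.1 "") = ""
        · simp [hp]
        · simp [hp]
    · rw [if_neg hk, if_neg hk]
      simp
  refine (PySem.List.foldl_congr_mem _ _ _ _ hstep).trans ?_
  rw [PySem.List.foldl_append_eq_flatMap]
  unfold pvRowSpec
  rw [hrow]

theorem pvBlocks_eq (N : Nat) :
    (PySem.List.pyRange 3 (N : Int) 15).flatMap (fun i => PySem.List.pyRange i (min (i + 12) (N : Int)) 1)
      = List.map (fun j : Nat => (j : Int)) ((List.range N).filter pvIsData) := by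
  have hmemblk : ∀ (i x : Int), x ∈ PySem.List.pyRange i (min (i + 12) (N : Int)) 1 ↔
      i ≤ x ∧ x < min (i + 12) (N : Int) := by
    intro i x
    rw [PySem.List.mem_pyRange_iff_of_pos (by omega)]
    constructor
    · rintro ⟨h1, h2, -⟩; exact ⟨h1, h2⟩
    · rintro ⟨h1, h2⟩; exact ⟨h1, h2, one_dvd _⟩
  have hmemout : ∀ i : Int, i ∈ PySem.List.pyRange 3 (N : Int) 15 ↔
      3 ≤ i ∧ i < N ∧ (15 : Int) ∣ i - 3 := fun i => PySem.List.mem_pyRange_iff_of_pos (by omega) i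
  have hmemL : ∀ x : Int, (x ∈ (PySem.List.pyRange 3 (N : Int) 15).flatMap
      (fun i => PySem.List.pyRange i (min (i + 12) (N : Int)) 1)) ↔
      (3 ≤ x ∧ x < (N : Int) ∧ (x - 3) % 15 < 12) := by
    intro x
    rw [List.mem_flatMap]
    constructor
    · rintro ⟨i, hi, hx⟩
      rw [hmemout] at hi
      rw [hmemblk] at hx
      obtain ⟨hi3, hiN, t, ht⟩ := hi
      obtain ⟨hx1, hx2⟩ := hx
      refine ⟨by omega, by omega, by omega⟩
    · rintro ⟨h3, hN, hm⟩
      refine ⟨x - (x - 3) % 15, ?_, ?_⟩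
      · rw [hmemout]
        have := Int.emod_nonneg (x - 3) (by norm_num : (15:Int) ≠ 0)
        refine ⟨by omega, by omega, ⟨(x - 3) / 15, by omega⟩⟩
      · rw [hmemblk]
        have := Int.emod_nonneg (x - 3) (by norm_num : (15:Int) ≠ 0)
        omega
  have hmemR : ∀ x : Int, (x ∈ List.map (fun j : Nat => (j : Int)) ((List.range N).filter pvIsData)) ↔
      (3 ≤ x ∧ x < (N : Int) ∧ (x - 3) % 15 < 12) := by
    intro x
    simp only [List.mem_map, List.mem_filter, List.mem_range, pvIsData, Bool.and_eq_true,
      decide_eq_true_eq]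
    constructor
    · rintro ⟨j, ⟨hjN, hj3, hjm⟩, rfl⟩
      refine ⟨by omega, by omega, by omega⟩
    · intro h
      exact ⟨x.toNat, ⟨by omega, by omega, by omega⟩, by omega⟩
  have hblkinc : ∀ i : Int, (PySem.List.pyRange i (min (i + 12) (N : Int)) 1).Pairwise (· < ·) := by
    intro i
    rw [PySem.List.pyRange_of_pos _ _ (by omega)]
    refine List.pairwise_map.2 ?_
    refine (List.pairwise_lt_range).imp ?_
    intro a b h; omega
  have houtinc : (PySem.List.pyRange 3 (N : Int) 15).Pairwise (fun i1 i2 : Int => i1 + 15 ≤ i2) := by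
    rw [PySem.List.pyRange_of_pos _ _ (by omega : (0:Int) < 15)]
    refine List.pairwise_map.2 ?_
    refine (List.pairwise_lt_range).imp ?_
    intro a b h; omega
  have hLinc : ((PySem.List.pyRange 3 (N : Int) 15).flatMap
      (fun i => PySem.List.pyRange i (min (i + 12) (N : Int)) 1)).Pairwise (· < ·) := by
    rw [List.flatMap, List.pairwise_flatten]
    constructor
    · intro l hl
      rw [List.mem_map] at hl
      obtain ⟨i, -, rfl⟩ := hl
      exact hblkinc i
    · refine List.pairwise_map.2 ?_
      refine houtinc.imp ?_
      intro i1 i2 h x hx y hy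
      rw [hmemblk] at hx hy
      omega
  have hRinc : (List.map (fun j : Nat => (j : Int)) ((List.range N).filter pvIsData)).Pairwise (· < ·) := by
    refine List.pairwise_map.2 ?_
    refine (List.Pairwise.filter _ List.pairwise_lt_range).imp ?_
    intro a b h; omega
  have hperm : ((PySem.List.pyRange 3 (N : Int) 15).flatMap
      (fun i => PySem.List.pyRange i (min (i + 12) (N : Int)) 1)).Perm
      (List.map (fun j : Nat => (j : Int)) ((List.range N).filter pvIsData)) := by
    refine (List.perm_ext_iff_of_nodup ?_ ?_).2 ?_
    · exact hLinc.imp ne_of_lt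
    · exact hRinc.imp ne_of_lt
    · intro x; rw [hmemL, hmemR]
  exact List.eq_of_perm_of_sorted (fun a b _ _ h1 h2 => le_antisymm h1 h2)
    (hLinc.imp le_of_lt) (hRinc.imp le_of_lt) hperm

theorem pvA_eq_spec (values : List (List String)) :
    pvGetSheetPokemon values = ((List.range values.length).filter pvIsData).flatMap (pvRowSpec values) := by
  unfold pvGetSheetPokemon
  simp only [PySem.List.len_eq]
  have hinner : ∀ (acc : List (String × String × String × String)) (i : Int),
      i ∈ PySem.List.pyRange 3 (values.length : Int) 15 →
      ((PySem.List.pyRange i (min (i + 12) (values.length : Int)) 1).foldl (fun acc j =>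
        (PySem.List.enumerate (PySem.List.pyGetD values j [])).foldl (fun acc p =>
          if pvKeep p.2 then
            match pvScanA values p.1 (j - 1).toNat with
            | some player =>
              if player ≠ "" then
                acc ++ [(player, PySem.Str.strip p.2, pvKD (PySem.List.pyGetD values j []) (p.1 + 2),
                         pvKD (PySem.List.pyGetD values j []) (p.1 + 3))]
              else acc
            | none => acc
          else acc) acc) acc)
      = acc ++ (PySem.List.pyRange i (min (i + 12) (values.length : Int)) 1).flatMap
          (fun j : Int => pvRowSpec values j.toNat) := by
    intro acc i hi
    rw [PySem.List.mem_pyRange_iff_of_pos (by omega)] at hi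
    have hstep : ∀ (acc : List (String × String × String × String)) (j : Int),
        j ∈ PySem.List.pyRange i (min (i + 12) (values.length : Int)) 1 →
        ((PySem.List.enumerate (PySem.List.pyGetD values j [])).foldl (fun acc p =>
          if pvKeep p.2 then
            match pvScanA values p.1 (j - 1).toNat with
            | some player =>
              if player ≠ "" then
                acc ++ [(player, PySem.Str.strip p.2, pvKD (PySem.List.pyGetD values j []) (p.1 + 2),
                         pvKD (PySem.List.pyGetD values j []) (p.1 + 3))]
              else acc
            | none => acc
          else acc) acc)
        = acc ++ pvRowSpec values j.toNat := by
      intro acc j hj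
      rw [PySem.List.mem_pyRange_iff_of_pos (by omega)] at hj
      exact pvRowA_eq values j (by omega) acc
    refine (PySem.List.foldl_congr_mem _ _ _ _ hstep).trans ?_
    rw [PySem.List.foldl_append_eq_flatMap]
  refine (PySem.List.foldl_congr_mem _ _ _ _ hinner).trans ?_
  rw [PySem.List.foldl_append_eq_flatMap, List.nil_append, ← List.flatMap_assoc, pvBlocks_eq,
    List.flatMap_map]
  simp only [Int.toNat_natCast]

-- ===== B side =====

theorem pvGet?_hdrFold (l : List (Int × String)) (j : Int) (d : PySem.Dict Int Int) (i : Int) :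
    (l.foldl (fun d p => if PySem.Str.isIn "POKEMON" p.2 then d.insert p.1 j else d) d).get? i
      = if ∃ p ∈ l, p.1 = i ∧ PySem.Str.isIn "POKEMON" p.2 = true then some j else d.get? i := by
  induction l generalizing d with
  | nil => simp
  | cons q l ih =>
    rw [List.foldl_cons, ih]
    by_cases hl : ∃ p ∈ l, p.1 = i ∧ PySem.Str.isIn "POKEMON" p.2 = true
    · rw [if_pos hl, if_pos ⟨hl.choose, List.mem_cons_of_mem q hl.choose_spec.1, hl.choose_spec.2⟩]
    · rw [if_neg hl]
      by_cases hq : PySem.Str.isIn "POKEMON" q.2 = true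
      · rw [if_pos hq, PySem.Dict.get?_insert]
        by_cases hiq : i = q.1
        · rw [if_pos hiq, if_pos ⟨q, List.mem_cons_self .., hiq.symm, hq⟩]
        · rw [if_neg hiq, if_neg ?_]
          rintro ⟨p, hp, hpi, hpP⟩
          rcases List.mem_cons.1 hp with rfl | hpl
          · exact hiq hpi.symm
          · exact hl ⟨p, hpl, hpi, hpP⟩
      · rw [if_neg hq, if_neg ?_]
        rintro ⟨p, hp, hpi, hpP⟩
        rcases List.mem_cons.1 hp with rfl | hpl
        · exact hq hpP
        · exact hl ⟨p, hpl, hpi, hpP⟩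

theorem pvCond_iff (values : List (List String)) (m : Nat) (hm : m < values.length)
    (idx : Int) (hidx : 0 ≤ idx) :
    (∃ p ∈ PySem.List.enumerate values[m], p.1 = idx ∧ PySem.Str.isIn "POKEMON" p.2 = true)
      ↔ pvCond values idx m = true := by
  unfold pvCond
  have hrowm : PySem.List.pyGetD values (m : Int) [] = values[m] := by
    rw [PySem.List.pyGetD_natCast]
    exact List.getD_eq_getElem _ _ hm
  rw [hrowm]
  simp only [PySem.List.len_eq, Bool.and_eq_true, decide_eq_true_eq]
  constructor
  · rintro ⟨p, hp, hpi, hpP⟩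
    rw [PySem.List.mem_enumerate_iff] at hp
    obtain ⟨k, hk, rfl⟩ := hp
    simp only [zero_add] at hpi hpP
    constructor
    · rw [← hpi]; exact_mod_cast hk
    · rw [← hpi, PySem.List.pyGetD_natCast, List.getD_eq_getElem _ _ hk]
      exact hpP
  · rintro ⟨hlen, hP⟩
    refine ⟨((0:Int) + (idx.toNat : Int), values[m][idx.toNat]'(by omega)), ?_, ?_, ?_⟩
    · rw [PySem.List.mem_enumerate_iff]
      exact ⟨idx.toNat, by omega, rfl⟩
    · show (0:Int) + (idx.toNat : Int) = idx
      omega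
    · show PySem.Str.isIn "POKEMON" (values[m][idx.toNat]'(by omega)) = true
      have hidxc : idx = ((idx.toNat : Nat) : Int) := by omega
      rw [hidxc, PySem.List.pyGetD_natCast] at hP
      rw [List.getD_eq_getElem _ _ (by omega)] at hP
      exact hP

theorem pvGet?_pvHdrUpdate (values : List (List String)) (m : Nat) (hm : m < values.length)
    (j : Int) (d : PySem.Dict Int Int) (idx : Int) (hidx : 0 ≤ idx) :
    (pvHdrUpdate j values[m] d).get? idx
      = if pvCond values idx m = true then some j else d.get? idx := by
  unfold pvHdrUpdate
  rw [pvGet?_hdrFold]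
  rw [if_congr (pvCond_iff values m hm idx hidx) rfl rfl]

set_option maxHeartbeats 1000000 in
theorem pvRowB_eq (values : List (List String)) (d : PySem.Dict Int Int) (m : Nat)
    (hm : m < values.length)
    (hd : ∀ idx : Int, 0 ≤ idx → d.get? idx = (pvScanK values idx (m - 1)).map (fun k : Nat => (k : Int)))
    (acc : List (String × String × String × String)) :
    pvRowB values d (values[m]) acc = acc ++ pvRowSpec values m := by
  unfold pvRowB
  have hrow : values.getD m [] = values[m] := List.getD_eq_getElem _ _ hm
  have hstep : ∀ (acc : List (String × String × String × String)) (p : Int × String),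
      p ∈ PySem.List.enumerate values[m] →
      (let name := PySem.Str.strip p.2
       if name ≠ "" && !(pvIsNum name) then
         match d.get? p.1 with
         | none => acc
         | some k =>
           let player := PySem.Str.strip (PySem.List.pyGetD (PySem.List.pyGetD values (k - 1) []) p.1 "")
           if player ≠ "" then
             acc ++ [(player, name, pvKD values[m] (p.1 + 2), pvKD values[m] (p.1 + 3))]
           else acc
       else acc)
      = acc ++ pvCellSpec values m p := by
    intro acc p hp
    have hp0 : 0 ≤ p.1 := by
      rw [PySem.List.mem_enumerate_iff] at hp
      obtain ⟨k, hk, rfl⟩ := hp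
      simp
    show (if pvKeep p.2 then
            match d.get? p.1 with
            | none => acc
            | some k =>
              let player := PySem.Str.strip (PySem.List.pyGetD (PySem.List.pyGetD values (k - 1) []) p.1 "")
              if player ≠ "" then
                acc ++ [(player, PySem.Str.strip p.2, pvKD values[m] (p.1 + 2), pvKD values[m] (p.1 + 3))]
              else acc
          else acc)
        = acc ++ pvCellSpec values m p
    rw [hd p.1 hp0]
    unfold pvCellSpec
    rw [hrow]
    by_cases hk : pvKeep p.2 = true
    · rw [if_pos hk, if_pos hk]
      cases hs : pvScanK values p.1 (m - 1) with
      | none => simp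
      | some k =>
        simp only [Option.map_some]
        by_cases hp : PySem.Str.strip (PySem.List.pyGetD (PySem.List.pyGetD values ((k : Int) - 1) []) p.1 "") = ""
        · simp [hp]
        · simp [hp]
    · rw [if_neg hk, if_neg hk]
      simp
  refine (PySem.List.foldl_congr_mem _ _ _ _ hstep).trans ?_
  rw [PySem.List.foldl_append_eq_flatMap]
  unfold pvRowSpec
  rw [hrow]

-- the single step of B's top-down pass (the fold function of pvExtractPass)
def pvStepB (values : List (List String))
    (st : List (String × String × String × String) × PySem.Dict Int Int)
    (p : Int × List String) : List (String × String × String × String) × PySem.Dict Int Int :=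
  let acc := if 3 ≤ p.1 && PySem.Int.mod (p.1 - 3) 15 < 12 then pvRowB values st.2 p.2 st.1 else st.1
  let d := if 1 ≤ p.1 then pvHdrUpdate p.1 p.2 st.2 else st.2
  (acc, d)

theorem pvPass_inv (values : List (List String)) (m : Nat) (hm : m ≤ values.length) :
    (((PySem.List.enumerate (values.take m)).foldl (pvStepB values) ([], PySem.Dict.empty)).1
        = ((List.range m).filter pvIsData).flatMap (pvRowSpec values))
    ∧ ∀ idx : Int, 0 ≤ idx →
      ((PySem.List.enumerate (values.take m)).foldl (pvStepB values) ([], PySem.Dict.empty)).2.get? idx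
        = (pvScanK values idx (m - 1)).map (fun k : Nat => (k : Int)) := by
  induction m with
  | zero =>
    constructor
    · simp [PySem.List.enumerate_nil]
    · intro idx _
      simp [PySem.List.enumerate_nil, pvScanK]
  | succ m ih =>
    obtain ⟨ih1, ih2⟩ := ih (by omega)
    have hm' : m < values.length := by omega
    have htake : values.take (m + 1) = values.take m ++ [values[m]] := by
      rw [List.take_succ, List.getElem?_eq_getElem hm']
      rfl
    have hlen : (values.take m).length = m := by
      rw [List.length_take]
      omega
    rw [htake, PySem.List.enumerate_append, List.foldl_append, hlen, PySem.List.enumerate_cons,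
      PySem.List.enumerate_nil, List.foldl_cons, List.foldl_nil]
    simp only [zero_add]
    set st := (PySem.List.enumerate (values.take m)).foldl (pvStepB values) ([], PySem.Dict.empty)
      with hstdef
    constructor
    · -- first component: the accumulated entry list
      have hguard : (3 ≤ ((m : Nat) : Int) && PySem.Int.mod (((m : Nat) : Int) - 3) 15 < 12) = pvIsData m := by
        by_cases h3 : 3 ≤ m
        · have h3' : (3 : Int) ≤ ((m : Nat) : Int) := by omega
          simp only [pvIsData, h3, h3', decide_true, Bool.true_and]
          rw [PySem.Int.mod_eq_emod_of_pos (by norm_num)]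
          exact decide_eq_decide.2 (by omega)
        · have h3' : ¬((3 : Int) ≤ ((m : Nat) : Int)) := by omega
          simp [pvIsData, h3, h3']
      show (pvStepB values st (((m : Nat) : Int), values[m])).1 = _
      unfold pvStepB
      dsimp only
      rw [hguard]
      cases hdata : pvIsData m
      · rw [ih1, List.range_succ, List.filter_append, List.flatMap_append]
        simp [hdata]
      · rw [if_pos rfl, pvRowB_eq values st.2 m hm' ih2, ih1, List.range_succ,
          List.filter_append, List.flatMap_append]
        simp [hdata]
    · -- second component: the headers dict
      intro idx hidx
      show (pvStepB values st (((m : Nat) : Int), values[m])).2.get? idx = _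
      unfold pvStepB
      dsimp only
      cases m with
      | zero =>
        rw [if_neg (by omega)]
        exact ih2 idx hidx
      | succ k =>
        rw [if_pos (by omega)]
        rw [pvGet?_pvHdrUpdate values (k + 1) hm' _ st.2 idx hidx, ih2 idx hidx]
        by_cases hc : pvCond values idx (k + 1) = true
        · simp [pvScanK, hc]
        · simp [pvScanK, hc]

theorem pvB_eq_spec (values : List (List String)) :
    pvExtractPass values = ((List.range values.length).filter pvIsData).flatMap (pvRowSpec values) := by
  unfold pvExtractPass
  have h := (pvPass_inv values values.length le_rfl).1
  rw [List.take_length] at h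
  exact h

-- ===== VERDICT (by name: the statement is the Claim_ definition above) =====
theorem create_pokemon_message_spec : Claim_equal_create_pokemon_message := by
  intro values _ _
  unfold Spec_create_pokemon_message create_pokemon_message create_pokemon_message_alt
  rw [pvA_eq_spec, pvB_eq_spec]
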